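-- pv_equiv track=rewrite | github.com/austencloud/the-kinetic-constructor | widgets/library/custom_sort_proxy_model.py | compute_display_length
-- ===== SOURCE A (Python) =====
-- def compute_display_length(name: str) -> int:
--     count = 0
--     skip_next = False
--     for i, char in enumerate(name):
--         if skip_next:
--             skip_next = False
--             continue
--         if char == "-" and i + 1 < len(name):
--             count += 1
--             skip_next = True
--         else:
--             count += 1
--     return count
-- ===== SOURCE B (Python) =====
-- def compute_display_length(name: str) -> int:
--     # Run-length arithmetic: each maximal run of m dashes hides floor((m+1)/2)
--     # characters if something follows the run, floor(m/2) if it ends the string;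
--     # the display length is the total length minus the hidden characters.
--     saved = 0
--     run = 0
--     for ch in name:
--         if ch == "-":
--             run += 1
--         else:
--             saved += (run + 1) // 2
--             run = 0
--     saved += run // 2
--     return len(name) - saved
-- ===== Notes on version B (the rewrite author's own statement) =====
-- stated objective: alternative
-- what changed: Instead of greedily pairing a dash with its successor via a skip flag, B counts per maximal dash run the closed-form number of hidden characters ((run+1)//2 if followed, run//2 at the end) and subtracts their sum from len(name).
import Mathlib
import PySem

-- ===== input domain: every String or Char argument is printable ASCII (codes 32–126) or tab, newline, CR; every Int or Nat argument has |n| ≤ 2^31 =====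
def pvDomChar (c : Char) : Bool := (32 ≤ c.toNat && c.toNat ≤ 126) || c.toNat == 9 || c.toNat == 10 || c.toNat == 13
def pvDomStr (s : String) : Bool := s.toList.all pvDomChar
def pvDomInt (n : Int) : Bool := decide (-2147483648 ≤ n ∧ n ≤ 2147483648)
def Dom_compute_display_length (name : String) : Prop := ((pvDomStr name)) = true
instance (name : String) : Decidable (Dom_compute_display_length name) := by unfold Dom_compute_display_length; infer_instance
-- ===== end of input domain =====

-- B replaces A's greedy skip-flag pairing by run-length arithmetic: it sums the
-- closed-form number of hidden characters per maximal dash run and subtracts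
-- that from the total length; objective: alternative.

-- ===== PORT A =====
def compute_display_length (name : String) : Int :=
  let cs := name.toList
  (PySem.List.enumerate cs |>.foldl
    (fun (st : Int × Bool) (p : Int × Char) =>
      if st.2 then (st.1, false)
      else if p.2 = '-' ∧ p.1 + 1 < (cs.length : Int) then (st.1 + 1, true)
      else (st.1 + 1, false)) ((0 : Int), false)).1

-- ===== PORT B =====
-- B's loop carries (saved, run); run is always ≥ 0, so Python's '//' here is
-- exactly Nat division, which the port uses.
def compute_display_length_alt (name : String) : Int :=
  let st := name.toList.foldl
    (fun (st : Int × Nat) c =>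
      if c = '-' then (st.1, st.2 + 1)
      else (st.1 + (((st.2 + 1) / 2 : Nat) : Int), 0))
    ((0 : Int), (0 : Nat))
  (name.toList.length : Int) - (st.1 + ((st.2 / 2 : Nat) : Int))

-- ===== PRECONDITION & SPEC =====
def Spec_compute_display_length (name : String) (out : Int) : Prop := out = compute_display_length_alt name
instance (name : String) (out : Int) : Decidable (Spec_compute_display_length name out) := by unfold Spec_compute_display_length; infer_instance

-- ===== CLAIM =====
def Claim_equal_compute_display_length : Prop := ∀ (name : String), Dom_compute_display_length name → Spec_compute_display_length name (compute_display_length name)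

-- ===== LEMMAS AND PROOFS =====

-- Proof-only helper: the greedy pairing as a structural recursion (dash pairs
-- with its successor when one exists).
def cdlGo : List Char → Int
  | [] => 0
  | c :: rest =>
    if c = '-' ∧ rest ≠ [] then 1 + cdlGo rest.tail else 1 + cdlGo rest
termination_by l => l.length
decreasing_by
  all_goals (simp [List.length_tail]; try omega)

-- A's loop body, abstracted over the total length L of the string.
def cdlStep (L : Int) (st : Int × Bool) (p : Int × Char) : Int × Bool :=
  if st.2 then (st.1, false)
  else if p.2 = '-' ∧ p.1 + 1 < L then (st.1 + 1, true)
  else (st.1 + 1, false)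

-- Loop invariant for A: folding A's body over the enumeration of a suffix l at
-- offset s (with s + l.length = L) from a non-skipping state adds cdlGo l.
theorem cdl_fold (L : Int) (l : List Char) : ∀ (s c : Int), s + l.length = L →
    ((PySem.List.enumerate l s).foldl (cdlStep L) (c, false)).1 = c + cdlGo l := by
  induction l using cdlGo.induct with
  | case1 => intro s c h; simp [PySem.List.enumerate, cdlGo]
  | case2 x rest hx ih =>
    intro s c h
    have hlt : s + 1 < L := by
      have : 0 < rest.length := List.length_pos_iff.mpr hx.2
      simp only [List.length_cons] at h; omega
    cases rest with
    | nil => exact absurd rfl hx.2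
    | cons y rest' =>
      rw [PySem.List.enumerate_cons, PySem.List.enumerate_cons]
      simp only [List.foldl_cons]
      have h1 : cdlStep L (c, false) (s, x) = (c + 1, true) := by
        simp [cdlStep, hx.1, hlt]
      have h2 : cdlStep L (c + 1, true) (s + 1, y) = (c + 1, false) := by
        simp [cdlStep]
      simp only [List.tail_cons] at ih
      rw [h1, h2, ih (s + 1 + 1) (c + 1)
        (by simp only [List.length_cons] at h ⊢; push_cast at h ⊢; omega)]
      rw [cdlGo, if_pos hx]
      simp only [List.tail_cons]; ring
  | case3 x rest hx ih =>
    intro s c h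
    have hbranch : ¬ (x = '-' ∧ s + 1 < L) := by
      intro ⟨hx1, hlt⟩
      apply hx
      refine ⟨hx1, ?_⟩
      intro hr
      subst hr
      simp only [List.length_cons, List.length_nil] at h
      omega
    rw [PySem.List.enumerate_cons]
    simp only [List.foldl_cons]
    have h1 : cdlStep L (c, false) (s, x) = (c + 1, false) := by
      simp only [cdlStep]
      rw [if_neg (by simp), if_neg hbranch]
    rw [h1, ih (s + 1) (c + 1)
      (by simp only [List.length_cons] at h; push_cast at h ⊢; omega)]
    rw [cdlGo, if_neg hx]
    ring

-- Proof-only helper: the hidden-character count of B, as a recursion carrying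
-- the length of the current dash run.
def sv : Nat → List Char → Nat
  | r, [] => r / 2
  | r, c :: t => if c = '-' then sv (r + 1) t else (r + 1) / 2 + sv 0 t

theorem sv_add2 (l : List Char) : ∀ r, sv (r + 2) l = 1 + sv r l := by
  induction l with
  | nil => intro r; simp [sv]; omega
  | cons c t ih =>
    intro r
    by_cases hc : c = '-'
    · simp only [sv, if_pos hc]
      have := ih (r + 1)
      omega
    · simp only [sv, if_neg hc]
      omega

-- B's fold equals its start value plus sv.
theorem fold_sv (l : List Char) : ∀ (s : Int) (r : Nat),
    (let st := l.foldl
      (fun (st : Int × Nat) c =>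
        if c = '-' then (st.1, st.2 + 1)
        else (st.1 + (((st.2 + 1) / 2 : Nat) : Int), 0)) (s, r)
     st.1 + ((st.2 / 2 : Nat) : Int)) = s + (sv r l : Int) := by
  induction l with
  | nil => intro s r; simp [sv]
  | cons c t ih =>
    intro s r
    by_cases hc : c = '-'
    · simp only [List.foldl_cons, if_pos hc, sv]
      exact ih s (r + 1)
    · simp only [List.foldl_cons, sv, if_neg hc]
      rw [ih]
      push_cast
      ring

-- The greedy pairing count equals length minus the hidden-character count.
theorem cdlGo_eq_sv (l : List Char) : cdlGo l = (l.length : Int) - (sv 0 l : Int) := by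
  induction l using cdlGo.induct with
  | case1 => simp [cdlGo, sv]
  | case2 x rest hx ih =>
    cases rest with
    | nil => exact absurd rfl hx.2
    | cons y t =>
      rw [cdlGo, if_pos hx]
      simp only [List.tail_cons] at ih ⊢
      have hsv : sv 0 (x :: y :: t) = 1 + sv 0 t := by
        simp only [sv, if_pos hx.1]
        by_cases hy : y = '-'
        · simp only [if_pos hy]
          have := sv_add2 t 0
          omega
        · simp only [if_neg hy]
      rw [ih, hsv]
      simp only [List.length_cons]
      push_cast
      ring
  | case3 x rest hx ih =>
    rw [cdlGo, if_neg hx]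
    by_cases hc : x = '-'
    · have hrest : rest = [] := by
        by_contra hne
        exact hx ⟨hc, hne⟩
      subst hrest
      simp [cdlGo, sv, hc]
    · have hsv : sv 0 (x :: rest) = sv 0 rest := by
        simp [sv, hc]
      rw [ih, hsv]
      simp only [List.length_cons]
      push_cast
      ring

-- ===== VERDICT =====
theorem compute_display_length_spec : Claim_equal_compute_display_length := by
  intro name _
  unfold Spec_compute_display_length compute_display_length compute_display_length_alt
  have hA := cdl_fold (name.toList.length : Int) name.toList 0 0 (by simp)
  have hB := fold_sv name.toList 0 0
  unfold cdlStep at hA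
  rw [cdlGo_eq_sv] at hA
  simp only at hB ⊢
  rw [hA]
  omega
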